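-- pv_equiv track=rewrite | github.com/tezeladata/algorithmical | Main account/codewars/Python/extra_kata4.py | sum_consecutives
-- ===== SOURCE A (Python) =====
-- def sum_consecutives(lst):
--     res_arr = []
--     i = 0
--     while i < len(lst):
--         current_sum = lst[i]
--         j = i + 1
--         while j < len(lst) and lst[j] == lst[i]:
--             current_sum += lst[j]
--             j += 1
--         res_arr.append(current_sum)
--         i = j
--     return res_arr
-- ===== SOURCE B (Python) =====
-- def sum_consecutives(lst):
--     res = []
--     anchor = None
--     run = 0
--     for x in lst:
--         if x == anchor:
--             run += x
--         else:
--             if anchor is not None: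
--                 res.append(run)
--             anchor = x
--             run = x
--     if anchor is not None:
--         res.append(run)
--     return res
-- ===== Notes on version B (the rewrite author's own statement) =====
-- stated objective: simpler
-- what changed: Replaced A's nested index-based while loops (inner scan per run, repeated lst[i]/len() indexing) by a single forward pass over the elements keeping the current run's anchor value and a running sum, flushed when the run ends.
import Mathlib
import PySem

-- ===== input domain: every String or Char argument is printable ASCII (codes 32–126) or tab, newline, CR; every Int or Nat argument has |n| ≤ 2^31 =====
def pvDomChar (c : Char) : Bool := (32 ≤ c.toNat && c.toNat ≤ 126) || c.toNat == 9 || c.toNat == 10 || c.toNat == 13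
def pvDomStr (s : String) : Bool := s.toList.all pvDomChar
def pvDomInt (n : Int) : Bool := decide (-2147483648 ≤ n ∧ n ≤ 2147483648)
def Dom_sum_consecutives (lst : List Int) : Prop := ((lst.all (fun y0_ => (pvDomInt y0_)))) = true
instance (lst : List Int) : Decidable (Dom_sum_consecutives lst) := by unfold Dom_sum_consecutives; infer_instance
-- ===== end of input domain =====

-- B: one forward pass keeping the current run's anchor and running sum (simpler decomposition than A's nested index loops).
-- ===== PORT A =====
-- inner while loop of A: j scans forward while lst[j] == lst[i], accumulating current_sum
-- (fuel = remaining steps, only to make the recursion structural; lst.length is always enough)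
def innerA (lst : List Int) (v : Int) (fuel : Nat) (j : Nat) (s : Int) : Int × Nat :=
  match fuel with
  | 0 => (s, j)
  | f + 1 =>
    if h : j < lst.length then
      if lst[j] = v then innerA lst v f (j + 1) (s + lst[j]) else (s, j)
    else (s, j)

-- outer while loop of A over index i
def outerA (lst : List Int) (fuel : Nat) (i : Nat) : List Int :=
  match fuel with
  | 0 => []
  | f + 1 =>
    if h : i < lst.length then
      (innerA lst lst[i] lst.length (i + 1) lst[i]).1 ::
        outerA lst f (innerA lst lst[i] lst.length (i + 1) lst[i]).2
    else []

def sum_consecutives (lst : List Int) : List Int := outerA lst lst.length 0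

-- ===== PORT B =====
-- one fold step of B: state = (res, anchor, run)
def stepB (st : List Int × Option Int × Int) (x : Int) : List Int × Option Int × Int :=
  match st with
  | (res, some a, run) =>
      if x = a then (res, some a, run + x)
      else (res ++ [run], some x, x)
  | (res, none, _) => (res, some x, x)

def sum_consecutives_alt (lst : List Int) : List Int :=
  match lst.foldl stepB ([], none, 0) with
  | (res, some _, run) => res ++ [run]
  | (res, none, _) => res

-- ===== PRECONDITION & SPEC =====
def Spec_sum_consecutives (lst : List Int) (out : List Int) : Prop := out = sum_consecutives_alt lst
instance (lst : List Int) (out : List Int) : Decidable (Spec_sum_consecutives lst out) := by unfold Spec_sum_consecutives; infer_instance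

-- ===== CLAIM (what is proved, stated in full; the proofs are below) =====
def Claim_equal_sum_consecutives : Prop := ∀ (lst : List Int), Dom_sum_consecutives lst → Spec_sum_consecutives lst (sum_consecutives lst)

-- ===== LEMMAS AND PROOFS =====

-- split off the leading run of a's: (sum of that run, remainder)
def runSplit (a : Int) : List Int → Int × List Int
  | [] => (0, [])
  | x :: xs => if x = a then ((runSplit a xs).1 + x, (runSplit a xs).2) else (0, x :: xs)

theorem runSplit_len (a : Int) (l : List Int) : (runSplit a l).2.length ≤ l.length := by
  induction l with
  | nil => simp [runSplit]
  | cons x xs ih =>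
    simp only [runSplit]
    split
    · exact Nat.le_succ_of_le ih
    · simp

-- reference run-summing function both ports are reduced to
def g : List Int → List Int
  | [] => []
  | x :: xs => (x + (runSplit x xs).1) :: g (runSplit x xs).2
termination_by l => l.length
decreasing_by
  have := runSplit_len x xs
  simp; omega

theorem innerA_spec (lst : List Int) (v : Int) : ∀ (fuel j : Nat) (s : Int),
    lst.length ≤ j + fuel →
    (innerA lst v fuel j s).1 = s + (runSplit v (lst.drop j)).1 ∧
    lst.drop (innerA lst v fuel j s).2 = (runSplit v (lst.drop j)).2 ∧
    j ≤ (innerA lst v fuel j s).2 := by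
  intro fuel
  induction fuel with
  | zero =>
    intro j s hf
    have hnil : lst.drop j = [] := List.drop_eq_nil_of_le (by omega)
    simp [innerA, hnil, runSplit]
  | succ f ih =>
    intro j s hf
    by_cases h : j < lst.length
    · have hd : lst.drop j = lst[j] :: lst.drop (j + 1) := List.drop_eq_getElem_cons h
      by_cases hv : lst[j] = v
      · show ((innerA lst v (f+1) j s).1 = _ ∧ _)
        rw [innerA]
        rw [dif_pos h, if_pos hv]
        have := ih (j + 1) (s + lst[j]) (by omega)
        rw [hd]
        have hr : runSplit v (lst[j] :: lst.drop (j + 1)) =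
            ((runSplit v (lst.drop (j + 1))).1 + lst[j], (runSplit v (lst.drop (j + 1))).2) := by
          simp [runSplit, hv]
        rw [hr]
        refine ⟨?_, this.2.1, by omega⟩
        rw [this.1]; ring
      · rw [innerA, dif_pos h, if_neg hv, hd]
        simp [runSplit, hv]
    · rw [innerA, dif_neg h]
      have hnil : lst.drop j = [] := List.drop_eq_nil_of_le (by omega)
      simp [hnil, runSplit]

theorem outerA_eq_g (lst : List Int) : ∀ (fuel i : Nat), lst.length ≤ i + fuel →
    outerA lst fuel i = g (lst.drop i) := by
  intro fuel
  induction fuel with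
  | zero =>
    intro i hf
    have hnil : lst.drop i = [] := List.drop_eq_nil_of_le (by omega)
    simp [outerA, hnil, g]
  | succ f ih =>
    intro i hf
    by_cases h : i < lst.length
    · rw [outerA, dif_pos h]
      have hd : lst.drop i = lst[i] :: lst.drop (i + 1) := List.drop_eq_getElem_cons h
      have hs := innerA_spec lst lst[i] lst.length (i + 1) lst[i] (by omega)
      rw [hd, g, ih _ (by omega), hs.2.1, hs.1]
    · rw [outerA, dif_neg h]
      have hnil : lst.drop i = [] := List.drop_eq_nil_of_le (by omega)
      simp [hnil, g]

-- finalize B's fold state as sum_consecutives_alt does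
def finB (st : List Int × Option Int × Int) : List Int :=
  match st with
  | (res, some _, run) => res ++ [run]
  | (res, none, _) => res

theorem foldB_spec (l : List Int) : ∀ (res : List Int) (a run : Int),
    finB (l.foldl stepB (res, some a, run)) =
      res ++ (run + (runSplit a l).1) :: g (runSplit a l).2 := by
  induction l with
  | nil => intro res a run; simp [finB, runSplit, g]
  | cons x xs ih =>
    intro res a run
    by_cases hx : x = a
    · subst hx
      rw [List.foldl_cons,
        show stepB (res, some x, run) x = (res, some x, run + x) from by simp [stepB],
        ih res x (run + x),
        show runSplit x (x :: xs) = ((runSplit x xs).1 + x, (runSplit x xs).2) from by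
          simp [runSplit],
        show run + x + (runSplit x xs).1 = run + ((runSplit x xs).1 + x) from by ring]
    · rw [List.foldl_cons,
        show stepB (res, some a, run) x = (res ++ [run], some x, x) from by simp [stepB, hx],
        ih (res ++ [run]) x x,
        show runSplit a (x :: xs) = (0, x :: xs) from by simp [runSplit, hx]]
      simp [g]

theorem alt_eq_g (lst : List Int) : sum_consecutives_alt lst = g lst := by
  cases lst with
  | nil => simp [sum_consecutives_alt, g]
  | cons x xs =>
    show finB ((x :: xs).foldl stepB ([], none, 0)) = g (x :: xs)
    simp only [List.foldl_cons, stepB]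
    rw [foldB_spec xs [] x x]
    simp [g]

-- ===== VERDICT (by name: the statement is the Claim_ definition above) =====
theorem sum_consecutives_spec : Claim_equal_sum_consecutives := by
  intro lst _
  show sum_consecutives lst = sum_consecutives_alt lst
  rw [alt_eq_g, sum_consecutives, outerA_eq_g lst lst.length 0 (by omega)]
  simp
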